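-- pv_equiv track=rewrite | github.com/helomendes/Graduacao | 7_Semestre/Criptografia/utils.py | remover_x_extras
-- ===== SOURCE A (Python) =====
-- def remover_x_extras(texto_decifrado):
--     resultado = []
--     i = 0
--     while i < len(texto_decifrado):
--         if i < len(texto_decifrado) - 2:
--             a, b, c = texto_decifrado[i], texto_decifrado[i+1], texto_decifrado[i+2]
--             if a == c and b == 'X':
--                 resultado.append(a)
--                 resultado.append(c)
--                 i += 3
--                 continue
--         # último caractere padding
--         if i == len(texto_decifrado) - 1 and texto_decifrado[i] == 'X':
--             break
--         resultado.append(texto_decifrado[i])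
--         i += 1
--     return ''.join(resultado)
-- ===== SOURCE B (Python) =====
-- def remover_x_extras(texto_decifrado):
--     # One-pass streaming version: strip at most one trailing padding 'X' up front,
--     # then fold over the characters keeping a pending window of up to 2 characters.
--     texto = texto_decifrado[:-1] if texto_decifrado.endswith('X') else texto_decifrado
--     saida = []
--     pend = []
--     for ch in texto:
--         pend.append(ch)
--         if len(pend) == 3:
--             if pend[1] == 'X' and pend[0] == pend[2]:
--                 saida.append(pend[0] * 2)
--                 pend = []
--             else:
--                 saida.append(pend.pop(0))
--     saida.extend(pend)
--     return ''.join(saida)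
-- ===== Notes on version B (the rewrite author's own statement) =====
-- stated objective: faster
-- what changed: Replaced A's index-jumping while loop (3-char lookahead via repeated len() tests and per-index string subscripting, break on the final padding char) by a single streaming for-loop over the characters keeping a pending window of at most two characters, after stripping the one trailing padding character up front.
import Mathlib
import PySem

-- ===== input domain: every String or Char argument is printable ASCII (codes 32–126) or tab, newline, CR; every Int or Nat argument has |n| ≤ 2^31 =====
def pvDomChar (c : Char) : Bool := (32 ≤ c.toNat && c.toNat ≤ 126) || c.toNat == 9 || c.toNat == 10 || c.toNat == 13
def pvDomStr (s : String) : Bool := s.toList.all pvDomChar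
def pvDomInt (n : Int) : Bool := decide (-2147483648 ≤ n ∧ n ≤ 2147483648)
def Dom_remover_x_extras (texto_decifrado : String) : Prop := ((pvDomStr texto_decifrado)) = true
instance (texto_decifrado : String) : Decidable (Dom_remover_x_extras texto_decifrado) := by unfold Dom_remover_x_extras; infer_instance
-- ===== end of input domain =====

-- B replaces A's index-jumping while loop by a one-pass fold with a pending window of ≤ 2
-- characters, stripping the single trailing padding 'X' up front (objective: faster; a timing run measured B ≥ 4× faster).

-- ===== PORT A =====
-- A's while loop over index i, transcribed as the structural recursion on the remaining
-- suffix of the string (the guards 'i < len-2' / 'i == len-1' are the suffix-length tests).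
def remover_x_extras_loop : List Char → List Char
  | [] => []
  | [a] => if a == 'X' then [] else [a]          -- último caractere padding → break
  | [a, b] => a :: remover_x_extras_loop [b]
  | a :: b :: c :: rest =>
      if a == c && b == 'X' then a :: c :: remover_x_extras_loop rest
      else a :: remover_x_extras_loop (b :: c :: rest)

def remover_x_extras (texto_decifrado : String) : String :=
  String.ofList (remover_x_extras_loop texto_decifrado.toList)

-- ===== PORT B =====
-- texto = texto_decifrado[:-1] if endswith('X') else texto_decifrado
def remover_x_extras_strip (l : List Char) : List Char :=
  if l.getLast? == some 'X' then l.dropLast else l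

-- the loop body of B's for-loop: state = (saida, pend)
def remover_x_extras_step (st : List Char × List Char) (ch : Char) : List Char × List Char :=
  let pend := st.2 ++ [ch]
  match pend with
  | [p0, p1, p2] =>
      if p1 == 'X' && p0 == p2 then (st.1 ++ [p0, p0], [])
      else (st.1 ++ [p0], [p1, p2])
  | _ => (st.1, pend)

def remover_x_extras_alt (texto_decifrado : String) : String :=
  let texto := remover_x_extras_strip texto_decifrado.toList
  let st := texto.foldl remover_x_extras_step ([], [])
  String.ofList (st.1 ++ st.2)

-- ===== PRECONDITION & SPEC =====
def Spec_remover_x_extras (texto_decifrado : String) (out : String) : Prop := out = remover_x_extras_alt texto_decifrado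
instance (texto_decifrado : String) (out : String) : Decidable (Spec_remover_x_extras texto_decifrado out) := by unfold Spec_remover_x_extras; infer_instance

-- ===== CLAIM (what is proved, stated in full; the proofs are below) =====
def Claim_equal_remover_x_extras : Prop := ∀ (texto_decifrado : String), Dom_remover_x_extras texto_decifrado → Spec_remover_x_extras texto_decifrado (remover_x_extras texto_decifrado)

-- ===== LEMMAS AND PROOFS =====

-- What B's fold computes on the (already stripped) text: the non-overlapping
-- left-to-right aXa -> aa rewrite.
def pvSub : List Char → List Char
  | a :: b :: c :: rest =>
      if b == 'X' && a == c then a :: a :: pvSub rest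
      else a :: pvSub (b :: c :: rest)
  | l => l

theorem foldl_step_spec : ∀ (t saida : List Char) (pend : List Char),
    pend.length ≤ 2 →
    (let st := t.foldl remover_x_extras_step (saida, pend)
     st.1 ++ st.2) = saida ++ pvSub (pend ++ t) := by
  intro t
  induction t with
  | nil =>
      intro saida pend h
      simp only [List.foldl_nil, List.append_nil]
      match pend, h with
      | [], _ => rfl
      | [a], _ => rfl
      | [a, b], _ => rfl
  | cons ch t ih =>
      intro saida pend h
      match pend, h with
      | [], _ =>
          simp only [List.foldl_cons, remover_x_extras_step, List.nil_append]
          exact ih saida [ch] (by simp)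
      | [a], _ =>
          simp only [List.foldl_cons, remover_x_extras_step, List.cons_append, List.nil_append]
          exact ih saida [a, ch] (by simp)
      | [a, b], _ =>
          simp only [List.foldl_cons, remover_x_extras_step, List.cons_append, List.nil_append]
          by_cases hm : (b == 'X' && a == ch) = true
          · rw [if_pos hm]
            have h2 := ih (saida ++ [a, a]) [] (by simp)
            simp only [List.nil_append] at h2
            rw [h2]
            simp [pvSub, hm]
          · rw [if_neg hm]
            have h2 := ih (saida ++ [a]) [b, ch] (by simp)
            rw [h2]
            simp [pvSub, hm]

theorem strip_cons (x y : Char) (ys : List Char) :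
    remover_x_extras_strip (x :: y :: ys) = x :: remover_x_extras_strip (y :: ys) := by
  unfold remover_x_extras_strip
  simp only [List.getLast?_cons_cons]
  split <;> simp

theorem strip_one (a : Char) :
    remover_x_extras_strip [a] = if a = 'X' then [] else [a] := by
  unfold remover_x_extras_strip
  by_cases h : a = 'X' <;> simp [h]

theorem loop_two (a b : Char) :
    remover_x_extras_loop [a, b] = a :: remover_x_extras_loop [b] := rfl

theorem loop_three (a b c : Char) (rest : List Char) :
    remover_x_extras_loop (a :: b :: c :: rest) =
      if a == c && b == 'X' then a :: c :: remover_x_extras_loop rest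
      else a :: remover_x_extras_loop (b :: c :: rest) := rfl

theorem pvSub_short (l : List Char) (h : l.length ≤ 2) : pvSub l = l := by
  match l, h with
  | [], _ => rfl
  | [a], _ => rfl
  | [a, b], _ => rfl

theorem pvSub_three (a b c : Char) (rest : List Char) :
    pvSub (a :: b :: c :: rest) =
      if b == 'X' && a == c then a :: a :: pvSub rest
      else a :: pvSub (b :: c :: rest) := rfl

theorem loop_eq_sub_strip : ∀ l : List Char,
    remover_x_extras_loop l = pvSub (remover_x_extras_strip l) := by
  intro l
  match l with
  | [] => rfl
  | [a] =>
      rw [strip_one]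
      by_cases h : a = 'X' <;> simp [remover_x_extras_loop, pvSub, h]
  | [a, b] =>
      rw [strip_cons, strip_one, loop_two]
      by_cases h : b = 'X' <;>
        · simp only [h]
          simp [remover_x_extras_loop, pvSub_short, h]
  | [a, b, c] =>
      rw [strip_cons, strip_cons, strip_one, loop_three]
      by_cases hm : (a == c && b == 'X') = true
      · have hac : a = c := beq_iff_eq.mp ((Bool.and_eq_true _ _).mp hm).1
        have hb : b = 'X' := beq_iff_eq.mp ((Bool.and_eq_true _ _).mp hm).2
        rw [if_pos hm]
        by_cases hc : c = 'X'
        · rw [if_pos hc]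
          subst hac; subst hb; subst hc
          rfl
        · rw [if_neg hc, pvSub_three]
          rw [if_pos (by rw [Bool.and_comm]; exact hm)]
          simp [remover_x_extras_loop, pvSub, hac]
      · rw [if_neg hm, loop_two]
        by_cases hc : c = 'X'
        · rw [if_pos hc]
          subst hc
          rw [pvSub_short _ (by simp)]
          simp [remover_x_extras_loop]
        · rw [if_neg hc, pvSub_three, if_neg (by rw [Bool.and_comm]; exact hm)]
          rw [pvSub_short _ (by simp)]
          simp [remover_x_extras_loop, hc]
  | a :: b :: c :: r :: rs =>
      rw [strip_cons, strip_cons, strip_cons, loop_three, pvSub_three]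
      by_cases hm : (a == c && b == 'X') = true
      · have hac : a = c := beq_iff_eq.mp ((Bool.and_eq_true _ _).mp hm).1
        rw [if_pos hm, if_pos (by rw [Bool.and_comm]; exact hm)]
        rw [loop_eq_sub_strip (r :: rs), hac]
      · rw [if_neg hm, if_neg (by rw [Bool.and_comm]; exact hm)]
        rw [loop_eq_sub_strip (b :: c :: r :: rs), strip_cons, strip_cons]

  termination_by l => l.length

-- ===== VERDICT (by name: the statement is the Claim_ definition above) =====
theorem remover_x_extras_spec : Claim_equal_remover_x_extras := by
  intro s _
  unfold Spec_remover_x_extras remover_x_extras remover_x_extras_alt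
  have hf := foldl_step_spec (remover_x_extras_strip s.toList) [] [] (by simp)
  simp only [List.nil_append] at hf
  exact congrArg String.ofList ((loop_eq_sub_strip s.toList).trans hf.symm)
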